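-- pv_equiv track=rewrite | github.com/Jacksadventure/betaMax | match_partial.py | _partial_date
-- ===== SOURCE A (Python) =====
-- def _partial_date(text: str) -> bool:
--     if len(text) >= 10:
--         return False
--     for idx, ch in enumerate(text):
--         if idx in (4, 7):
--             if ch != "-":
--                 return False
--         else:
--             if not ch.isdigit():
--                 return False
--     return True
-- ===== SOURCE B (Python) =====
-- def _partial_date(text: str) -> bool:
--     if len(text) >= 10:
--         return False
--     return (
--         (text[:4] == "" or text[:4].isdigit())
--         and text[4:5] in ("", "-")
--         and (text[5:7] == "" or text[5:7].isdigit())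
--         and text[7:8] in ("", "-")
--         and (text[8:9] == "" or text[8:9].isdigit())
--     )
-- ===== Notes on version B (the rewrite author's own statement) =====
-- stated objective: simpler
-- what changed: Replaces the indexed enumerate loop with a single boolean conjunction over fixed slices (digit groups and dash positions), removing the loop and branch-per-character logic.
import Mathlib
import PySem

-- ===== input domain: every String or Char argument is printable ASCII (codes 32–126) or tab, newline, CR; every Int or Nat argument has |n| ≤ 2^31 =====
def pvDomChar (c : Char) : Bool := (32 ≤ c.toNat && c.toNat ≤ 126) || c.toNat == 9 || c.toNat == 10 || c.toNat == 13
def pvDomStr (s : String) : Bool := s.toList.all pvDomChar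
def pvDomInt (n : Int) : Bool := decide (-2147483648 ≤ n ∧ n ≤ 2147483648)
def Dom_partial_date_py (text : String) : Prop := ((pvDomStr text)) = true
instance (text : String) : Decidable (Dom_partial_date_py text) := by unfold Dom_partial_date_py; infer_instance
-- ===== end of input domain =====

-- B replaces A's indexed per-character loop by a single boolean conjunction over fixed slices (simpler decomposition, same behaviour).

-- ===== PORT A =====
-- the 'for idx, ch in enumerate(text)' loop, carrying the running index
def pdLoopA : Nat → List Char → Bool
  | _, [] => true
  | idx, c :: rest =>
    if idx = 4 ∨ idx = 7 then
      if c ≠ '-' then false else pdLoopA (idx + 1) rest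
    else
      if ¬ (PySem.Chars.isdigit c = true) then false else pdLoopA (idx + 1) rest

def partial_date_py (text : String) : Bool :=
  if PySem.Str.len text ≥ 10 then false
  else pdLoopA 0 text.toList

-- ===== PORT B =====
-- slice == "" or slice.isdigit()
def pdDigitsOrEmpty (s : String) : Bool := s == "" || PySem.Str.strIsdigit s
-- slice in ("", "-")
def pdSep (s : String) : Bool := s == "" || s == "-"

def partial_date_py_alt (text : String) : Bool :=
  if PySem.Str.len text ≥ 10 then false
  else
    pdDigitsOrEmpty (PySem.Str.slice text none (some 4)) &&
    pdSep (PySem.Str.slice text (some 4) (some 5)) &&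
    pdDigitsOrEmpty (PySem.Str.slice text (some 5) (some 7)) &&
    pdSep (PySem.Str.slice text (some 7) (some 8)) &&
    pdDigitsOrEmpty (PySem.Str.slice text (some 8) (some 9))

-- ===== PRECONDITION & SPEC =====
def Spec_partial_date_py (text : String) (out : Bool) : Prop := out = partial_date_py_alt text
instance (text : String) (out : Bool) : Decidable (Spec_partial_date_py text out) := by unfold Spec_partial_date_py; infer_instance

-- ===== CLAIM (what is proved, stated in full; the proofs are below) =====
def Claim_equal_partial_date_py : Prop := ∀ (text : String), Dom_partial_date_py text → Spec_partial_date_py text (partial_date_py text)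

-- ===== LEMMAS AND PROOFS =====

theorem pd_beq (s t : String) : (s == t) = (s.toList == t.toList) := by
  by_cases h : s = t
  · subst h; simp
  · have h2 : s.toList ≠ t.toList := fun hh => h (by simpa using congrArg String.ofList hh)
    simp [h, h2]

theorem pd_beq_empty (s : String) : (s == "") = (s.toList == []) := pd_beq s ""

theorem pd_beq_dash (s : String) : (s == "-") = (s.toList == ['-']) := pd_beq s "-"

theorem pd_sl4 (l : List Char) : PySem.List.slice l none (some 4) = l.take 4 := by
  simpa using PySem.List.slice_to_natCast l 4
theorem pd_sl45 (l : List Char) : PySem.List.slice l (some 4) (some 5) = (l.drop 4).take 1 := by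
  have := PySem.List.slice_natCast l 4 5; norm_num at this; simpa using this
theorem pd_sl57 (l : List Char) : PySem.List.slice l (some 5) (some 7) = (l.drop 5).take 2 := by
  have := PySem.List.slice_natCast l 5 7; norm_num at this; simpa using this
theorem pd_sl78 (l : List Char) : PySem.List.slice l (some 7) (some 8) = (l.drop 7).take 1 := by
  have := PySem.List.slice_natCast l 7 8; norm_num at this; simpa using this
theorem pd_sl89 (l : List Char) : PySem.List.slice l (some 8) (some 9) = (l.drop 8).take 1 := by
  have := PySem.List.slice_natCast l 8 9; norm_num at this; simpa using this

-- the whole equivalence, on the underlying char list (length ≤ 9 after A's guard)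
theorem pd_key (l : List Char) (hl : l.length ≤ 9) :
    pdLoopA 0 l =
      ((((l.take 4) == []) || PySem.Chars.strIsdigit (l.take 4)) &&
       ((((l.drop 4).take 1) == []) || (((l.drop 4).take 1) == ['-'])) &&
       ((((l.drop 5).take 2) == []) || PySem.Chars.strIsdigit ((l.drop 5).take 2)) &&
       ((((l.drop 7).take 1) == []) || (((l.drop 7).take 1) == ['-'])) &&
       ((((l.drop 8).take 1) == []) || PySem.Chars.strIsdigit ((l.drop 8).take 1))) := by
  rcases l with _ | ⟨a, _ | ⟨b, _ | ⟨c, _ | ⟨d, _ | ⟨e, _ | ⟨f, _ | ⟨g, _ | ⟨h, _ | ⟨i, _ | ⟨j, rest⟩⟩⟩⟩⟩⟩⟩⟩⟩⟩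
  case cons.cons.cons.cons.cons.cons.cons.cons.cons.cons => exfalso; simp at hl; omega
  all_goals
    simp [pdLoopA, PySem.Chars.strIsdigit] <;>
      (try by_cases h4 : e = '-') <;> (try by_cases h7 : h = '-') <;>
      (try simp_all) <;> try ac_rfl

-- ===== VERDICT (by name: the statement is the Claim_ definition above) =====
theorem partial_date_py_spec : Claim_equal_partial_date_py := by
  intro text _
  unfold Spec_partial_date_py partial_date_py partial_date_py_alt
  by_cases hlen : PySem.Str.len text ≥ 10
  · rw [if_pos hlen, if_pos hlen]
  · have hl : text.toList.length ≤ 9 := by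
      have he : text.toList.length = PySem.Str.len text := by simp [PySem.Str.len]
      omega
    simp only [if_neg hlen, pdDigitsOrEmpty, pdSep, pd_beq_empty, pd_beq_dash,
      PySem.Str.strIsdigit_eq, PySem.Str.toList_slice, PySem.Chars.slice_eq_listSlice,
      pd_sl4, pd_sl45, pd_sl57, pd_sl78, pd_sl89]
    exact pd_key text.toList hl
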